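/- GENERATED by mk_final_copies.py from the proof of the farm's unit `codebook_decode_deinterleave_repeat.1` (farm:codebook_decode_deinterleave_repeat.1.2: Lemmas.lean) as the
   re-elaboration sweep compiled it — do not edit. -/
import Asan.CheckWalk
import Vorbis.Spec.ReaderLemmas
import Vorbis.Spec.Units.codebook_decode_deinterleave_repeat_1

/-!
  Pure lemmas of unit `codebook_decode_deinterleave_repeat.1`: what the stores of the prologue (all inside the function's own
  stack frame) and of `error` (`f->error`) leave alone — `Bits f`, the book at `c`, the table of output pointers, the two ints —
  and the bit-level forms of the four loads.
-/

open X86 X86.User Asan Vorbis Vorbis.Spec Vorbis.Spec.Deint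

namespace Vorbis.Spec.codebook_decode_deinterleave_repeat_1

/-- A dword read at a register address is the typed read `u32` at the register's number. -/
theorem readLE4_reg (mem : Mem) (w : Word) : mem.readLE w 4 = mem.u32 w.toNat := by
  unfold Mem.u32
  rw [addr_toNat]

/-- A byte read at a register address plus an offset is the typed read `u8`. -/
theorem readLE1_reg_add (mem : Mem) (w : Word) (k : Nat) :
    mem.readLE (w + UInt64.ofNat k) 1 = mem.u8 (w.toNat + k) := by
  unfold Mem.u8
  rw [← addr_add, addr_toNat]

/-- A number below `2^32` written to a 32-bit register and zero-extended is that number. -/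
theorem word_of_dword (n : Nat) (h : n < 2 ^ 32) : Word.ofBV (BitVec.ofNat 32 n) = UInt64.ofNat n := by
  rw [ofBV_eq_addr _ (by decide)]
  unfold addr
  rw [BitVec.toNat_ofNat, Nat.mod_eq_of_lt h]

/-- **Where a window of the function's own stack is**: inside the stack region, below the caller's stack pointer `rsp + 8`
(the clean part of the stack: no live object is there). -/
def InStack (e : State) (w : Span) : Prop :=
  0x700000 ≤ w.lo ∧ w.hi ≤ (e.reg .rsp).toNat + 8

/-- The window of the own frame (with `error`'s frame below it) is clean stack: `e.rsp − 160 ≥ 700000H` by the room of `AtEntry`. -/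
theorem frame_window (e : State) (hroom : 0x700000 + 496 ≤ (e.reg .rsp).toNat) :
    ∀ w, w ∈ [(⟨(e.reg .rsp).toNat - 160, (e.reg .rsp).toNat⟩ : Span)] → InStack e w := by
  intro w hw
  simp only [List.mem_cons, List.not_mem_nil, or_false] at hw
  subst hw
  unfold InStack
  simp only []
  omega

/-- The two windows of the segment's footprint: the own frame is clean stack, `f->error` lies inside `eof` + `error`. -/
theorem frame_error_windows (e : State) (hroom : 0x700000 + 496 ≤ (e.reg .rsp).toNat) :
    ∀ w, w ∈ [(⟨(e.reg .rsp).toNat - 160, (e.reg .rsp).toNat⟩ : Span),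
        ⟨(e.reg .rdi).toNat + 140, (e.reg .rdi).toNat + 140 + 4⟩] →
      InStack e w ∨ (fOf e + 136 ≤ w.lo ∧ w.hi ≤ fOf e + 144) := by
  intro w hw
  simp only [List.mem_cons, List.not_mem_nil, or_false] at hw
  rcases hw with rfl | rfl
  · left
    unfold InStack
    simp only []
    omega
  · right
    show (e.reg .rdi).toNat + 136 ≤ (e.reg .rdi).toNat + 140 ∧ (e.reg .rdi).toNat + 140 + 4 ≤ (e.reg .rdi).toNat + 144
    omega

/-- A live site misses every window of the function's own stack. -/
theorem site_off_stack {others : List Obj} {frames : List (Nat × FrameLayout)} {Blk : Block → Prop} {len : Nat} {e : State}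
    (hpre : DeintPre others frames Blk len e) (htop : 0x700000 < (e.reg .rsp).toNat + 8) {a n : Nat}
    (hs : Site (Live (stackObjs frames ++ others)) a n) {w : Span} (hw : InStack e w) : a + n ≤ w.lo ∨ w.hi ≤ a := by
  have hsh := hpre.book.reader.shadow
  have hsp := hsh.rsp
  have hwh := site_where hsh.inv hsh.offText htop hs
  unfold InStack at hw
  omega

/-- **The reader's state and the two ints through the stores of this segment**: every window is in the function's own stack or
inside `eof` + `error` of `*f` (the footprint of `error`). `Bits f` is kept with the same μ, the two ints read as at entry. -/
theorem reader_ints {others : List Obj} {frames : List (Nat × FrameLayout)} {Blk : Block → Prop} {len : Nat} {e : State}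
    (hpre : DeintPre others frames Blk len e) (htop : 0x700000 < (e.reg .rsp).toNat + 8) {ws : List Span} {m : Mem}
    (hs : Mem.SameExcept ws e.mem m) (hws : ∀ w, w ∈ ws → InStack e w ∨ (fOf e + 136 ≤ w.lo ∧ w.hi ≤ fOf e + 144)) :
    ReaderPost Blk len e.mem m (fOf e) ∧ m.i32 (cpOf e) = e.mem.i32 (cpOf e) ∧ m.i32 (ppOf e) = e.mem.i32 (ppOf e) := by
  simp only [fOf, cpOf, ppOf] at hws ⊢
  have hsh := hpre.book.reader.shadow
  have hsp := hsh.rsp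
  have wf := hpre.book.reader.where_obj
  have hcpf := hpre.apart.cpObj
  have hppf := hpre.apart.ppObj
  simp only [vblock, Off.sizeof.stb_vorbis] at hcpf hppf
  have wcp := site_where hsh.inv hsh.offText htop hpre.cpSite
  have wpp := site_where hsh.inv hsh.offText htop hpre.ppSite
  simp only [L.textHi] at wcp wpp
  refine ⟨?_, ?_, ?_⟩
  · refine (Vorbis.Spec.Paging.reader_of_footprint hpre.book.reader.bits hs ?_).1
    intro w hw
    rcases hws w hw with h | h
    · unfold InStack at h
      left
      omega
    · right
      exact h
  · have hE : Mem.EqOn (e.reg .r8).toNat ((e.reg .r8).toNat + 4) e.mem m := by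
      apply hs.eqOn
      intro w hw
      rcases hws w hw with h | h
      · unfold InStack at h
        omega
      · omega
    exact hE.i32 _ (Nat.le_refl _) (Nat.le_refl _) (by omega)
  · have hE : Mem.EqOn (e.reg .r9).toNat ((e.reg .r9).toNat + 4) e.mem m := by
      apply hs.eqOn
      intro w hw
      rcases hws w hw with h | h
      · unfold InStack at h
        omega
      · omega
    exact hE.i32 _ (Nat.le_refl _) (Nat.le_refl _) (by omega)

/-- **The book and the table of output pointers through the stores of the prologue**: every window is in the function's own
stack. The struct at `c` reads the same (`SameFields`), `CodebookOK c` and `BookApart` hold in the new memory, and the `ch`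
pointers `outputs[k]` are as at entry. -/
theorem book_table {others : List Obj} {frames : List (Nat × FrameLayout)} {Blk : Block → Prop} {len : Nat} {e : State}
    (hpre : DeintPre others frames Blk len e) (htop : 0x700000 < (e.reg .rsp).toNat + 8) {ws : List Span} {m : Mem}
    (hs : Mem.SameExcept ws e.mem m) (hws : ∀ w, w ∈ ws → InStack e w) :
    CodebookOK Blk m (cOf e) ∧ BookApart m (fOf e) (cOf e) ∧ Codebook.SameFields e.mem m (cOf e) ∧
      (∀ k, k < chOf e → m.ptr (outsOf e + 8 * k) = e.mem.ptr (outsOf e + 8 * k)) := by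
  have hsh := hpre.book.reader.shadow
  have hL := hpre.book.reader.env.live
  obtain ⟨B, hB, hBin⟩ := hpre.book.book
  have hcsite : Site (Live (stackObjs frames ++ others)) (cOf e) Off.sizeof.Codebook :=
    Codebook.site_field hL hB hBin 0 Off.sizeof.Codebook (Nat.le_refl _) (by decide) rfl
  -- the struct at `c` misses every window
  have hd1 : ∀ w, w ∈ ws →
      (Codebook.block (cOf e)).base + (Codebook.block (cOf e)).size ≤ w.lo ∨ w.hi ≤ (Codebook.block (cOf e)).base := by
    intro w hw
    exact site_off_stack hpre htop hcsite (hws w hw)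
  -- … and so does the `sorted_values` block
  have hd2 : 1 ≤ Codebook.sorted_entries e.mem (cOf e) → ∀ w, w ∈ ws →
      (Codebook.svBlock e.mem (cOf e)).base + (Codebook.svBlock e.mem (cOf e)).size ≤ w.lo ∨
        w.hi ≤ (Codebook.svBlock e.mem (cOf e)).base := by
    intro hse w hw
    have hBsv := hpre.book.cb.K4.sv hse
    have hsite : Site (Live (stackObjs frames ++ others)) (Codebook.svBlock e.mem (cOf e)).base
        (Codebook.svBlock e.mem (cOf e)).size :=
      Site.of_blk hL hBsv (Nat.le_refl _) (Nat.le_refl _) (by simp only []; omega)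
    exact site_off_stack hpre htop hsite (hws w hw)
  have hkept : (Codebook.block (cOf e)).Kept e.mem m :=
    Block.Kept.of_sameExcept hs hd1 (Codebook.block_no_wrap hpre.book.ok hB hBin)
  have hsf : Codebook.SameFields e.mem m (cOf e) := Codebook.SameFields.of_kept hkept
  refine ⟨?_, ?_, hsf, ?_⟩
  · exact hpre.book.cb.frame_sameExcept hpre.book.ok hB hBin hs hd1 hd2
  · exact hpre.book.apart.frame hsf
  · intro k hk
    have wt := site_where hsh.inv hsh.offText htop hpre.table
    have hE : Mem.EqOn (e.reg .rdx).toNat ((e.reg .rdx).toNat + 8 * argU32 (e.reg .rcx)) e.mem m := by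
      apply hs.eqOn
      intro w hw
      exact site_off_stack hpre htop hpre.table (hws w hw)
    simp only [outsOf, chOf] at hk ⊢
    simp only [L.textHi] at wt
    exact hE.ptr _ (by omega) (by omega) (by omega)

/-- **The segment's stores lie inside the contract's footprint**: a window of the function's own stack frame (496 bytes) and,
after `error`, `f->error` — a part of the reader's window `[f + 136, f + 144)` of `deint.wins`. -/
theorem same_footprint {others : List Obj} {frames : List (Nat × FrameLayout)} {Blk : Block → Prop} {len : Nat} {e : State}
    {m : Mem} {k : Nat} (hk : k ≤ 496)
    (hs : Mem.SameExcept [⟨(e.reg .rsp).toNat - k, (e.reg .rsp).toNat⟩, ⟨fOf e + 140, fOf e + 140 + 4⟩] e.mem m) :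
    Mem.SameExcept ((codebook_decode_deinterleave_repeat.spec others frames Blk len).footprint e) e.mem m := by
  apply hs.mono
  intro w hw a h1 h2
  simp only [List.mem_cons, List.not_mem_nil, or_false] at hw
  unfold X86.User.Spec.footprint
  rcases hw with rfl | rfl
  · refine ⟨_, List.mem_cons_self, ?_, ?_⟩
    · simp only [vspec] at h1 ⊢
      omega
    · exact h2
  · refine ⟨⟨fOf e + 136, fOf e + 144⟩, List.mem_cons_of_mem _ ?_, ?_, ?_⟩
    · simp only [vspec, deint.wins, bookWins, List.cons_append, List.nil_append, List.mem_cons, true_or, or_true]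
    · simp only [] at h1 ⊢
      omega
    · simp only [] at h2 ⊢
      omega

/-- The position invariant at the loop head, from the precondition: CI of the two ints, `effective = dimensions ≥ 1`. -/
theorem head_inv {others : List Obj} {frames : List (Nat × FrameLayout)} {Blk : Block → Prop} {len : Nat} {e : State}
    (hpre : DeintPre others frames Blk len e) :
    Res.DeintInv (e.mem.i32 (cpOf e)).toNat (e.mem.i32 (ppOf e)).toNat (chOf e) (lenOf e) (dimOf e) (dimOf e) := by
  refine Res.DeintInv.init hpre.inter.ok ?_
  have h := hpre.book.cb.K1.dim_pos
  show 1 ≤ (Codebook.dimensions e.mem (e.reg .rsi).toNat).toNat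
  omega

/-- K6 and the test at 10DC12H: a `lookup_type` that is not 0 (as a byte) is 2. -/
theorem type2_of_ne {Blk : Block → Prop} {mem : Mem} {c : Nat} (h : CodebookOK Blk mem c)
    (hne : ¬ Codebook.lookup_type mem c % 256 = 0) : Codebook.lookup_type mem c = 2 := by
  rcases h.K6.type_02 with h0 | h2
  · rw [h0] at hne
    exact absurd rfl hne
  · exact h2

end Vorbis.Spec.codebook_decode_deinterleave_repeat_1
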